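-- pv_equiv track=rewrite | github.com/apirogov/apirogov.github.io | blog/generating-orthogonal-set-partitions/set_partitions.py | mols_to_mops
-- ===== SOURCE A (Python) =====
-- def mols_to_mops(mols):
--     """Convert MOLS into orthogonal set partitions via orthogonal arrays.
--
--     Returns n+2 set partitions of n^2 elements from a set of n MOLS.
--     The returned list will always start with the trivial partition
--     (i.e., counting up in sequential order, separated into groups).
--
--     See https://en.wikipedia.org/wiki/Mutually_orthogonal_Latin_squares#Nets
--     """
--     oa = [  # convert to OA
--         [r, c] + [mols[i][r][c] for i in range(len(mols))]
--         for r in range(len(mols[0]))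
--         for c in range(len(mols[0][0]))
--     ]
--     num_mols, ls_sz, oa_rows = len(mols), len(mols[0]), len(oa)
--     rc_j = [ # partitions based on rows/cols of OA
--         [
--             [ ls_sz * oa[k][0] + oa[k][1]
--               for k in range(oa_rows) if oa[k][row_or_col] == j
--             ] for j in range(ls_sz)
--         ] for row_or_col in range(2)
--     ]
--     l_ij = [ # partitions induced by latin square columns
--         [
--             [
--                 ls_sz * oa[k][0] + oa[k][1]
--                 for k in range(oa_rows) if oa[k][2 + i] == j
--             ] for j in range(ls_sz)
--         ] for i in range(num_mols)
--     ]
--     return rc_j + l_ij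
-- ===== SOURCE B (Python) =====
-- def mols_to_mops(mols):
--     """Convert MOLS into orthogonal set partitions via orthogonal arrays.
--
--     Single-pass bucketing: each OA row is appended to the bucket keyed by
--     its value in the given coordinate, instead of re-scanning the whole OA
--     for every group value.
--     """
--     n = len(mols[0])
--     oa = [
--         [r, c] + [sq[r][c] for sq in mols]
--         for r in range(n)
--         for c in range(len(mols[0][0]))
--     ]
--
--     def bucket(d):
--         bs = [[] for _ in range(n)]
--         for row in oa:
--             v = row[d]
--             if 0 <= v < n:
--                 bs[v].append(n * row[0] + row[1])
--         return bs
--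
--     return [bucket(d) for d in range(2 + len(mols))]
-- ===== Notes on version B (the rewrite author's own statement) =====
-- stated objective: faster
-- what changed: Instead of rescanning the whole orthogonal array once per group value (per coordinate), B makes a single bucketing pass per coordinate, appending each OA row to the bucket keyed by its value at that coordinate.
import Mathlib
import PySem

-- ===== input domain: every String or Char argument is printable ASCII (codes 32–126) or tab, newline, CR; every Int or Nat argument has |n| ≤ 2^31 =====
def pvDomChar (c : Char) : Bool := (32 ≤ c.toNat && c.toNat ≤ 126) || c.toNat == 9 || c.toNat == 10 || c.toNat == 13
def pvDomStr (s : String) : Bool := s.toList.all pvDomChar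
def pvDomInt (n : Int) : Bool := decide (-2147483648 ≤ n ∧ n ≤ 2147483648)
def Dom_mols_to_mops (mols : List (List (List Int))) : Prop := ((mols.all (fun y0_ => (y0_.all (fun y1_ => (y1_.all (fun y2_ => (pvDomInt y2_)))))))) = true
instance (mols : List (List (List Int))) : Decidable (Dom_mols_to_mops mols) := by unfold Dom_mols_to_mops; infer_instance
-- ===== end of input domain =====

-- B replaces A's per-group rescans of the orthogonal array by one bucketing pass per coordinate.

-- ===== PORT A =====
-- literal transliteration of Source A: build oa, then scan all OA indices once per group value
def mols_to_mops (mols : List (List (List Int))) : List (List (List Int)) :=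
  let oa : List (List Int) :=
    (List.range (mols.headD []).length).flatMap (fun (r : Nat) =>
      (List.range ((mols.headD []).headD []).length).map (fun (c : Nat) =>
        [(r : Int), (c : Int)] ++
          (List.range mols.length).map (fun (i : Nat) =>
            ((mols.getD i []).getD r []).getD c 0)))
  let numMols := mols.length
  let lsSz := (mols.headD []).length
  let oaRows := oa.length
  let rc_j : List (List (List Int)) :=
    (List.range 2).map (fun (rowOrCol : Nat) =>
      (List.range lsSz).map (fun (j : Nat) =>
        ((List.range oaRows).filter (fun (k : Nat) =>
            (oa.getD k []).getD rowOrCol 0 == (j : Int))).map (fun (k : Nat) =>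
          (lsSz : Int) * (oa.getD k []).getD 0 0 + (oa.getD k []).getD 1 0)))
  let l_ij : List (List (List Int)) :=
    (List.range numMols).map (fun (i : Nat) =>
      (List.range lsSz).map (fun (j : Nat) =>
        ((List.range oaRows).filter (fun (k : Nat) =>
            (oa.getD k []).getD (2 + i) 0 == (j : Int))).map (fun (k : Nat) =>
          (lsSz : Int) * (oa.getD k []).getD 0 0 + (oa.getD k []).getD 1 0)))
  rc_j ++ l_ij

-- ===== PORT B =====
-- one step of Source B's bucketing loop: route one OA row to the bucket keyed by its value at coordinate d
def bStep (n : Nat) (d : Nat) (bs : List (List Int)) (row : List Int) : List (List Int) :=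
  let v := row.getD d 0
  if 0 ≤ v ∧ v < (n : Int) then
    bs.modify v.toNat (fun b => b ++ [(n : Int) * row.getD 0 0 + row.getD 1 0])
  else bs

def mols_to_mops_alt (mols : List (List (List Int))) : List (List (List Int)) :=
  let n := (mols.headD []).length
  let oa : List (List Int) :=
    (List.range n).flatMap (fun (r : Nat) =>
      (List.range ((mols.headD []).headD []).length).map (fun (c : Nat) =>
        [(r : Int), (c : Int)] ++ mols.map (fun sq => (sq.getD r []).getD c 0)))
  let bucket := fun (d : Nat) => oa.foldl (bStep n d) (List.replicate n [])
  (List.range (2 + mols.length)).map bucket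

-- ===== PRECONDITION & SPEC =====
-- Pre_ excludes exactly the inputs where Python A raises IndexError: empty mols, or a
-- square/row too short for the (nonzero) shape of mols[0].
def Pre_mols_to_mops (mols : List (List (List Int))) : Prop :=
  mols ≠ [] ∧
  (((mols.headD []).headD []).length = 0 ∨
    ∀ m ∈ mols, (mols.headD []).length ≤ m.length ∧
      ∀ row ∈ m.take (mols.headD []).length,
        ((mols.headD []).headD []).length ≤ row.length)
instance (mols : List (List (List Int))) : Decidable (Pre_mols_to_mops mols) := by
  unfold Pre_mols_to_mops; infer_instance
def pvWitness_mols_to_mops : List (List (List Int)) := [[[0, 1], [1, 0]], [[0, 1], [1, 0]]]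
def Spec_mols_to_mops (mols : List (List (List Int))) (out : List (List (List Int))) : Prop := out = mols_to_mops_alt mols
instance (mols : List (List (List Int))) (out : List (List (List Int))) : Decidable (Spec_mols_to_mops mols out) := by unfold Spec_mols_to_mops; infer_instance

-- ===== CLAIM (what is proved, stated in full; the proofs are below) =====
def Claim_equal_mols_to_mops : Prop := ∀ (mols : List (List (List Int))), Dom_mols_to_mops mols → Pre_mols_to_mops mols → Spec_mols_to_mops mols (mols_to_mops mols)

-- ===== LEMMAS AND PROOFS =====

-- turning A's index-based scan into a scan over the OA rows themselves
theorem filter_map_range_getD {α β : Type} (d0 : α) (p : α → Bool) (f : α → β)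
    (l : List α) :
    ((List.range l.length).filter (fun k => p (l.getD k d0))).map
        (fun k => f (l.getD k d0)) =
      (l.filter p).map f := by
  induction l using List.reverseRecOn with
  | nil => simp
  | append_singleton l a ih =>
    have hcong : ∀ k ∈ List.range l.length,
        (l ++ [a]).getD k d0 = l.getD k d0 := by
      intro k hk
      exact List.getD_append _ _ _ _ (List.mem_range.mp hk)
    rw [List.length_append, List.length_singleton, List.range_succ,
        List.filter_append, List.map_append,
        List.filter_congr (fun k hk => by rw [hcong k hk]),
        List.map_congr_left (l := (List.range l.length).filter _)
          (fun k hk => by rw [hcong k (List.mem_of_mem_filter hk)]), ih,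
        List.filter_append, List.map_append]
    congr 1
    by_cases hp : p a = true
    · simp [hp]
    · simp [hp]

theorem map_range_getD {α β : Type} (d0 : α) (f : α → β) (l : List α) :
    (List.range l.length).map (fun k => f (l.getD k d0)) = l.map f := by
  have h := filter_map_range_getD d0 (fun _ => true) f l
  simpa using h

theorem length_bStep (n d : Nat) (bs : List (List Int)) (row : List Int) :
    (bStep n d bs row).length = bs.length := by
  unfold bStep
  by_cases hc : 0 ≤ row.getD d 0 ∧ row.getD d 0 < (n : Int)
  · rw [if_pos hc]; exact List.length_modify _ _ _
  · rw [if_neg hc]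

theorem getD_bStep (n d : Nat) (bs : List (List Int)) (row : List Int)
    (j : Nat) (hlen : bs.length = n) (hj : j < n) :
    (bStep n d bs row).getD j [] =
      bs.getD j [] ++
        (if row.getD d 0 == (j : Int) then
          [(n : Int) * row.getD 0 0 + row.getD 1 0] else []) := by
  unfold bStep
  by_cases hc : 0 ≤ row.getD d 0 ∧ row.getD d 0 < (n : Int)
  · rw [if_pos hc]
    obtain ⟨h0, hn⟩ := hc
    have hjlt : j < bs.length := by omega
    have hjlt' : j < (bs.modify (row.getD d 0).toNat
        (fun b => b ++ [(n : Int) * row.getD 0 0 + row.getD 1 0])).length := by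
      rw [List.length_modify]; exact hjlt
    rw [List.getD_eq_getElem _ _ hjlt', List.getD_eq_getElem _ _ hjlt,
        List.getElem_modify]
    by_cases heq : (row.getD d 0).toNat = j
    · have hb : (row.getD d 0 == (j : Int)) = true := by
        simp only [beq_iff_eq]; omega
      rw [if_pos heq, hb]; simp
    · have hb : (row.getD d 0 == (j : Int)) = false := by
        simp only [beq_eq_false_iff_ne, ne_eq]
        intro h; apply heq; omega
      rw [if_neg heq, hb]; simp
  · rw [if_neg hc]
    have hb : (row.getD d 0 == (j : Int)) = false := by
      simp only [beq_eq_false_iff_ne, ne_eq]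
      intro h; apply hc
      constructor <;> omega
    rw [hb]; simp

theorem length_foldl_bStep (n d : Nat) (rows : List (List Int)) (bs : List (List Int)) :
    (rows.foldl (bStep n d) bs).length = bs.length := by
  induction rows generalizing bs with
  | nil => rfl
  | cons row rest ih => rw [List.foldl_cons, ih, length_bStep]

theorem foldl_bStep_getD (n d : Nat) (rows : List (List Int)) (bs : List (List Int))
    (j : Nat) (hlen : bs.length = n) (hj : j < n) :
    (rows.foldl (bStep n d) bs).getD j [] =
      bs.getD j [] ++
        ((rows.filter (fun row => row.getD d 0 == (j : Int))).map
          (fun row => (n : Int) * row.getD 0 0 + row.getD 1 0)) := by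
  induction rows generalizing bs with
  | nil => simp
  | cons row rest ih =>
    rw [List.foldl_cons, List.filter_cons,
        ih _ (by rw [length_bStep]; exact hlen),
        getD_bStep n d bs row j hlen hj]
    cases hb : (row.getD d 0 == (j : Int)) <;> simp

-- one A-style block of groups (at any coordinate d) is exactly B's bucket pass at d
theorem range_map_block_eq (n d : Nat) (oa : List (List Int)) :
    (List.range n).map (fun (j : Nat) =>
      ((List.range oa.length).filter (fun (k : Nat) =>
          (oa.getD k []).getD d 0 == (j : Int))).map (fun (k : Nat) =>
        (n : Int) * (oa.getD k []).getD 0 0 + (oa.getD k []).getD 1 0)) =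
    oa.foldl (bStep n d) (List.replicate n []) := by
  apply List.ext_getElem
  · rw [List.length_map, List.length_range, length_foldl_bStep, List.length_replicate]
  · intro j h1 h2
    have hj : j < n := by simpa using h1
    have hfold := foldl_bStep_getD n d oa (List.replicate n []) j
      (List.length_replicate) hj
    rw [List.getD_replicate _ hj, List.nil_append] at hfold
    have hidx : (oa.foldl (bStep n d) (List.replicate n []))[j] =
        (oa.foldl (bStep n d) (List.replicate n [])).getD j [] :=
      (List.getD_eq_getElem _ _ h2).symm
    rw [List.getElem_map, List.getElem_range, hidx, hfold]
    exact filter_map_range_getD ([] : List Int)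
      (fun row => row.getD d 0 == (j : Int))
      (fun row => (n : Int) * row.getD 0 0 + row.getD 1 0) oa

-- ===== VERDICT (by name: the statement is the Claim_ definition above) =====
theorem mols_to_mops_spec : Claim_equal_mols_to_mops := by
  intro mols _ _
  unfold Spec_mols_to_mops mols_to_mops mols_to_mops_alt
  dsimp only
  have hoa :
      (List.range (mols.headD []).length).flatMap (fun (r : Nat) =>
        (List.range ((mols.headD []).headD []).length).map (fun (c : Nat) =>
          [(r : Int), (c : Int)] ++ mols.map (fun sq => (sq.getD r []).getD c 0))) =
      (List.range (mols.headD []).length).flatMap (fun (r : Nat) =>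
        (List.range ((mols.headD []).headD []).length).map (fun (c : Nat) =>
          [(r : Int), (c : Int)] ++
            (List.range mols.length).map (fun (i : Nat) =>
              ((mols.getD i []).getD r []).getD c 0))) := by
    congr 1
    funext r
    congr 1
    funext c
    congr 1
    exact (map_range_getD ([] : List (List Int))
      (fun sq => (sq.getD r []).getD c 0) mols).symm
  rw [hoa, List.range_add, List.map_append, List.map_map]
  congr 1
  · exact List.map_congr_left (fun d _ => range_map_block_eq _ d _)
  · refine List.map_congr_left (fun i _ => ?_)
    exact range_map_block_eq _ (2 + i) _
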